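-- pv_equiv track=rewrite | github.com/jenny-jione/apple-game | main.py | pop_apple
-- ===== SOURCE A (Python) =====
-- def pop_line(line: list):
--     i = 0
--     j = 1
--     while(i<len(line) and j<=len(line)):
--         if sum(line[i:j]) == 10:
--             line[i:j] = [0 for _ in line[i:j]]
--             i += (j-i)
--             j = i+1
--         elif sum(line[i:j]) > 10:
--             i += 1
--             j = i+1
--         else:
--             j += 1
--     return line
--
-- def transpose(matrix: list):
--     result = []
--     b = len(matrix)
--     a = len(matrix[0])
--     for i in range(a):
--         row = []
--         for j in range(b):
--             row.append(matrix[j][i])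
--         result.append(row)
--     return result
--
-- def pop_apple(matrix: list, dir_row: bool):
--     h = len(matrix)
--     w = len(matrix[0])
--     result = []
--     if dir_row:
--         for i in range(h):
--             row = []
--             for j in range(w):
--                 row.append(matrix[i][j])
--             result.append(pop_line(row))
--         return result
--     else:
--         for j in range(w):
--             col = []
--             for i in range(h):
--                 col.append(matrix[i][j])
--             result.append(pop_line(col))
--         return transpose(result)
-- ===== SOURCE B (Python) =====
-- # B: works on the ORIGINAL line via a prefix-sum array computed once (popped cells are
-- # never re-read by later windows, so no mutation is needed during the scan); it collects
-- # the list of runs to zero and applies them in a final pass; zip-free comprehension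
-- # transpose. Window sums become O(1) subtractions, dropping a factor of the line length.
--
-- def _zero_runs(line):
--     # prefix sums of the original line; every window the scan ever tests lies entirely
--     # to the right of all previously popped runs, so its sum is a difference of these.
--     pref = [0]
--     for x in line:
--         pref.append(pref[-1] + x)
--     runs = []
--     n = len(line)
--     i = 0
--     while i < n:
--         j = next((j for j in range(i + 1, n + 1) if pref[j] - pref[i] >= 10), None)
--         if j is None:
--             break
--         if pref[j] - pref[i] == 10:
--             runs.append((i, j))
--             i = j
--         else:
--             i += 1
--     return runs
--
--
-- def _pop_line(line):
--     out = list(line)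
--     for i, j in _zero_runs(line):
--         for t in range(i, j):
--             out[t] = 0
--     return out
--
--
-- def pop_apple(matrix: list, dir_row: bool):
--     w = len(matrix[0])
--     if dir_row:
--         return [_pop_line(row[:w]) for row in matrix]
--     cols = [_pop_line([row[j] for row in matrix]) for j in range(w)]
--     return [[col[i] for col in cols] for i in range(len(matrix))]
-- ===== Notes on version B (the rewrite author's own statement) =====
-- stated objective: faster
-- what changed: A mutates the line in place and re-sums a growing slice at every step; B never mutates during the scan: it precomputes one prefix-sum array of the original line (valid because popped cells are never re-read by later windows), collects the runs to zero as an interval list, and writes the zeros index-wise in a final pass, so each window test is an O(1) subtraction and the fill costs O(line length) in total.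
import Mathlib
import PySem

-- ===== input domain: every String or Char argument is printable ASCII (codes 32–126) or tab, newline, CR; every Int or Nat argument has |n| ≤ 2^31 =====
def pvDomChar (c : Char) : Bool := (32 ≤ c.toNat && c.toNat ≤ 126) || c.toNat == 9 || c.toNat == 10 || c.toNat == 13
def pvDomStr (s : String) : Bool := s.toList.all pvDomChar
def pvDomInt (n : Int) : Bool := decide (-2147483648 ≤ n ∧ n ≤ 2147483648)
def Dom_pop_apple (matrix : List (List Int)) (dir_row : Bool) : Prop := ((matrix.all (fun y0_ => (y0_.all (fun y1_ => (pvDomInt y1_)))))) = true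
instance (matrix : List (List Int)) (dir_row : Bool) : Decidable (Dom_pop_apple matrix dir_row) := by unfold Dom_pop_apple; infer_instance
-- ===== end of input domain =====

-- B replaces A's in-place slice re-summing with one precomputed prefix-sum array over the
-- unmutated line plus a collected run list written out index-wise at the end (objective: faster).

-- ===== PORT A =====
-- A's pop_line while-loop; the fuel argument only makes the recursion structural and is
-- provably sufficient for the loop to run to completion from the entry state (0, 1).
def popLineA : Nat → List Int → Nat → Nat → List Int
  | 0, line, _, _ => line
  | fuel + 1, line, i, j =>
    if i < line.length ∧ j ≤ line.length then
      if (PySem.List.slice line (some (i : Int)) (some (j : Int))).sum = 10 then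
        popLineA fuel (line.take i ++ List.replicate (j - i) 0 ++ line.drop j) j (j + 1)
      else if (PySem.List.slice line (some (i : Int)) (some (j : Int))).sum > 10 then
        popLineA fuel line (i + 1) (i + 2)
      else
        popLineA fuel line i (j + 1)
    else line

def popLine (line : List Int) : List Int :=
  popLineA ((line.length + 1) * (line.length + 2)) line 0 1

def transposeA (m : List (List Int)) : List (List Int) :=
  let b := m.length
  let a := (PySem.List.pyGetD m 0 []).length
  (List.range a).map (fun (i : Nat) => (List.range b).map (fun (j : Nat) => PySem.List.pyGetD (PySem.List.pyGetD m ((j : Nat) : Int) []) ((i : Nat) : Int) 0))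

def pop_apple (matrix : List (List Int)) (dir_row : Bool) : List (List Int) :=
  let h := matrix.length
  let w := (PySem.List.pyGetD matrix 0 []).length
  if dir_row then
    (List.range h).map (fun (i : Nat) =>
      popLine ((List.range w).map (fun (j : Nat) => PySem.List.pyGetD (PySem.List.pyGetD matrix ((i : Nat) : Int) []) ((j : Nat) : Int) 0)))
  else
    transposeA ((List.range w).map (fun (j : Nat) =>
      popLine ((List.range h).map (fun (i : Nat) => PySem.List.pyGetD (PySem.List.pyGetD matrix ((i : Nat) : Int) []) ((j : Nat) : Int) 0))))

-- ===== PORT B =====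
-- the 'pref = [0]; for x in line: pref.append(pref[-1] + x)' loop of B's _zero_runs
def prefixSums (line : List Int) : List Int :=
  line.foldl (fun pref x => pref ++ [pref.getLastD 0 + x]) [0]

-- 'next((j for j in range(i+1, n+1) if pref[j]-pref[i] >= 10), None)'
def findJ (pref : List Int) (i n : Nat) : Option Nat :=
  (List.range' (i + 1) (n - i)).find? (fun j => decide ((10 : Int) ≤ pref.getD j 0 - pref.getD i 0))

-- the while-loop of B's _zero_runs; i strictly increases, so fuel n is enough
def zeroRunsLoop : Nat → List Int → Nat → Nat → List (Nat × Nat)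
  | 0, _, _, _ => []
  | fuel + 1, pref, n, i =>
    if i < n then
      match findJ pref i n with
      | none => []
      | some j =>
        if pref.getD j 0 - pref.getD i 0 = 10 then (i, j) :: zeroRunsLoop fuel pref n j
        else zeroRunsLoop fuel pref n (i + 1)
    else []

-- one run of B's _pop_line fill loop: 'for t in range(i, j): out[t] = 0'
def setRun (out : List Int) (r : Nat × Nat) : List Int :=
  (List.range' r.1 (r.2 - r.1)).foldl (fun o t => o.set t 0) out

def popLineAlt (line : List Int) : List Int :=
  (zeroRunsLoop line.length (prefixSums line) line.length 0).foldl setRun line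

def pop_apple_alt (matrix : List (List Int)) (dir_row : Bool) : List (List Int) :=
  let w := (matrix.headD []).length
  if dir_row then
    matrix.map (fun row => popLineAlt (row.take w))
  else
    let cols := (List.range w).map (fun j => popLineAlt (matrix.map (fun row => row.getD j 0)))
    (List.range matrix.length).map (fun i => cols.map (fun col => col.getD i 0))

-- ===== PRECONDITION & SPEC =====
-- Pre_ excludes exactly the inputs on which A raises IndexError: the empty matrix, rows
-- shorter than the first row, and (in the column direction) a zero-width first row, on
-- which A's transpose indexes result[0] of an empty result.
def Pre_pop_apple (matrix : List (List Int)) (dir_row : Bool) : Prop :=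
  matrix ≠ [] ∧ (∀ row ∈ matrix, (matrix.headD []).length ≤ row.length) ∧
    (dir_row = false → (matrix.headD []).length ≠ 0)
instance (matrix : List (List Int)) (dir_row : Bool) : Decidable (Pre_pop_apple matrix dir_row) := by
  unfold Pre_pop_apple; infer_instance

def pvWitness_pop_apple : List (List Int) × Bool := ([[3, 7, 2], [5, 5, 1]], false)

def Spec_pop_apple (matrix : List (List Int)) (dir_row : Bool) (out : List (List Int)) : Prop := out = pop_apple_alt matrix dir_row
instance (matrix : List (List Int)) (dir_row : Bool) (out : List (List Int)) : Decidable (Spec_pop_apple matrix dir_row out) := by unfold Spec_pop_apple; infer_instance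

-- ===== CLAIM (what is proved, stated in full; the proofs are below) =====
def Claim_equal_pop_apple : Prop := ∀ (matrix : List (List Int)) (dir_row : Bool), Dom_pop_apple matrix dir_row → Pre_pop_apple matrix dir_row → Spec_pop_apple matrix dir_row (pop_apple matrix dir_row)

-- ===== LEMMAS AND PROOFS =====

-- proof-side model of A's inner scan phase: extend the window from j with running sum s
-- until it reaches ≥ 10 or the end of the line
def popScanB : Nat → List Int → Nat → Int → Nat × Int
  | 0, _, j, s => (j, s)
  | fuel + 1, line, j, s =>
    if j < line.length then
      if s + line.getD j 0 ≥ 10 then (j + 1, s + line.getD j 0)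
      else popScanB fuel line (j + 1) (s + line.getD j 0)
    else (j, s)

theorem popScanB_bounds (line : List Int) (fuel : Nat) :
    ∀ (j : Nat) (s : Int),
      j ≤ (popScanB fuel line j s).1 ∧ (popScanB fuel line j s).1 ≤ max j line.length := by
  induction fuel with
  | zero => intro j s; simp [popScanB]
  | succ fuel ih =>
    intro j s
    rw [popScanB]
    split
    · split
      · rename_i hj _
        simp
        omega
      · have := ih (j + 1) (s + line.getD j 0)
        rename_i hj _
        omega
    · simp

theorem popScanB_gt (line : List Int) (fuel : Nat) (j : Nat) (s : Int)
    (hf : 0 < fuel) (hj : j < line.length) : j < (popScanB fuel line j s).1 := by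
  cases fuel with
  | zero => omega
  | succ fuel =>
    rw [popScanB]
    rw [if_pos hj]
    split
    · simp
    · have := popScanB_bounds line fuel (j + 1) (s + line.getD j 0)
      omega

theorem sum_take_succ_getD (l : List Int) (n : Nat) (h : n < l.length) :
    (l.take (n + 1)).sum = (l.take n).sum + l.getD n 0 := by
  rw [List.sum_take_succ l n h, List.getD_eq_getElem l 0 h]

-- A's scan phase (states (i, j+1) with the window [i:j] still summing below 10)
-- follows popScanB's incremental scan step for step, consuming one unit of fuel per step
theorem scan_sim_aux (line : List Int) (i : Nat) (hi : i < line.length) (k : Nat) :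
    ∀ j s f, i ≤ j → j ≤ line.length → line.length - j = k → line.length + 1 - j ≤ f →
      s = ((line.drop i).take (j - i)).sum → s < 10 →
      popLineA f line i (j + 1) =
        (if (popScanB (line.length - j) line j s).2 = 10 then
          popLineA (f - ((popScanB (line.length - j) line j s).1 - j))
            (line.take i ++ List.replicate ((popScanB (line.length - j) line j s).1 - i) 0 ++
              line.drop (popScanB (line.length - j) line j s).1)
            (popScanB (line.length - j) line j s).1 ((popScanB (line.length - j) line j s).1 + 1)
        else if (popScanB (line.length - j) line j s).2 > 10 then
          popLineA (f - ((popScanB (line.length - j) line j s).1 - j)) line (i + 1) (i + 2)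
        else line) := by
  induction k with
  | zero =>
    intro j s f hij hj hk hf hs hlt
    have hjn : j = line.length := by omega
    have hscan : popScanB (line.length - j) line j s = (j, s) := by
      rw [hk, popScanB]
    rw [hscan]
    obtain ⟨f', rfl⟩ : ∃ f', f = f' + 1 := ⟨f - 1, by omega⟩
    rw [popLineA, if_neg (by omega)]
    rw [if_neg (by simpa using hlt.ne), if_neg (by simp; omega)]
  | succ k ih =>
    intro j s f hij hj hk hf hs hlt
    have hjlt : j < line.length := by omega
    have hgd : (line.drop i).getD (j - i) 0 = line.getD j 0 := by
      rw [List.getD_eq_getElem _ 0 (by simp; omega), List.getD_eq_getElem _ 0 hjlt]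
      rw [List.getElem_drop]
      congr 1
      omega
    have hsum : s + line.getD j 0 = ((line.drop i).take (j + 1 - i)).sum := by
      rw [hs, (by omega : j + 1 - i = (j - i) + 1), sum_take_succ_getD _ _ (by simp; omega), hgd]
    have hslice : (PySem.List.slice line (some (i : Int)) (some (((j : Nat) + 1 : Nat) : Int))).sum = s + line.getD j 0 := by
      rw [PySem.List.slice_natCast, hsum]
    obtain ⟨f', rfl⟩ : ∃ f', f = f' + 1 := ⟨f - 1, by omega⟩
    have hnj : line.length - j = (line.length - (j + 1)) + 1 := by omega
    by_cases hge : (10 : Int) ≤ s + line.getD j 0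
    · have hscan : popScanB (line.length - j) line j s = (j + 1, s + line.getD j 0) := by
        rw [hnj, popScanB, if_pos hjlt, if_pos hge]
      have hp1 : (popScanB (line.length - j) line j s).1 = j + 1 := by rw [hscan]
      have hp2 : (popScanB (line.length - j) line j s).2 = s + line.getD j 0 := by rw [hscan]
      rw [hp1, hp2]
      conv_lhs => rw [popLineA]
      rw [if_pos (by omega : i < line.length ∧ j + 1 ≤ line.length)]
      rw [hslice]
      have hfe : f' + 1 - (j + 1 - j) = f' := by omega
      rw [hfe]
      by_cases h10 : s + line.getD j 0 = 10
      · rw [if_pos h10, if_pos h10]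
      · have hgt : s + line.getD j 0 > 10 := by omega
        rw [if_neg h10, if_pos hgt, if_neg h10, if_pos hgt]
    · have hscan : popScanB (line.length - j) line j s =
          popScanB (line.length - (j + 1)) line (j + 1) (s + line.getD j 0) := by
        rw [hnj, popScanB, if_pos hjlt, if_neg hge]
      have hstep := ih (j + 1) (s + line.getD j 0) f' (by omega) (by omega) (by omega) (by omega) hsum (by omega)
      conv_lhs => rw [popLineA]
      rw [if_pos (by omega : i < line.length ∧ j + 1 ≤ line.length)]
      rw [hslice]
      rw [if_neg (by omega), if_neg (by omega)]
      rw [hstep, hscan]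
      have hb := popScanB_bounds line (line.length - (j + 1)) (j + 1) (s + line.getD j 0)
      have hfe : ∀ m : Nat, j + 1 ≤ m → f' - (m - (j + 1)) = f' + 1 - (m - j) := by
        intro m hm; omega
      rw [hfe _ (by omega)]

-- running tails of the prefix-sum loop
def tailSums (c : Int) : List Int → List Int
  | [] => []
  | x :: xs => (c + x) :: tailSums (c + x) xs

theorem foldl_pref_step (xs : List Int) :
    ∀ acc : List Int,
      xs.foldl (fun pref x => pref ++ [pref.getLastD 0 + x]) acc =
        acc ++ tailSums (acc.getLastD 0) xs := by
  induction xs with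
  | nil => intro acc; simp [tailSums]
  | cons x xs ih =>
    intro acc
    rw [List.foldl_cons, ih, tailSums]
    simp

theorem tailSums_getD (xs : List Int) :
    ∀ c k, k < xs.length → (tailSums c xs).getD k 0 = c + (xs.take (k + 1)).sum := by
  induction xs with
  | nil => intro c k h; simp at h
  | cons x xs ih =>
    intro c k h
    cases k with
    | zero => simp [tailSums]
    | succ k =>
      rw [tailSums, List.getD_cons_succ, ih (c + x) k (by simpa using h)]
      simp [add_assoc]

theorem prefixSums_eq (line : List Int) : prefixSums line = 0 :: tailSums 0 line := by
  unfold prefixSums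
  rw [foldl_pref_step]
  rfl

theorem prefixSums_getD (line : List Int) (k : Nat) (hk : k ≤ line.length) :
    (prefixSums line).getD k 0 = (line.take k).sum := by
  rw [prefixSums_eq]
  cases k with
  | zero => simp
  | succ k =>
    rw [List.getD_cons_succ, tailSums_getD line 0 k (by omega)]
    simp

theorem sum_take_sub (line : List Int) (i t : Nat) (hit : i ≤ t) (ht : t ≤ line.length) :
    (line.take t).sum - (line.take i).sum = ((line.drop i).take (t - i)).sum := by
  have h : line.take t = line.take i ++ (line.drop i).take (t - i) := by
    rw [← List.take_add]
    congr 1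
    omega
  rw [h, List.sum_append]
  ring

-- windows right of i are unaffected by earlier zeroing
theorem window_eq (line cur : List Int) (hlen : cur.length = line.length)
    (i : Nat) (hag : ∀ t, i ≤ t → t < line.length → cur.getD t 0 = line.getD t 0)
    (a t : Nat) (hia : i ≤ a) (hat : a ≤ t) (ht : t ≤ line.length) :
    (cur.drop a).take (t - a) = (line.drop a).take (t - a) := by
  apply List.ext_getElem
  · simp [hlen]
  · intro m h1 h2
    simp only [List.getElem_take, List.getElem_drop]
    have hm : m < t - a := by simpa using (by simp at h1; omega : m < t - a)
    have h3 : a + m < cur.length := by omega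
    have h4 : a + m < line.length := by omega
    have := hag (a + m) (by omega) (by omega)
    rw [List.getD_eq_getElem cur 0 h3, List.getD_eq_getElem line 0 h4] at this
    exact this

theorem pref_diff (line cur : List Int) (hlen : cur.length = line.length)
    (i : Nat) (hag : ∀ t, i ≤ t → t < line.length → cur.getD t 0 = line.getD t 0)
    (t : Nat) (hit : i ≤ t) (ht : t ≤ line.length) :
    (prefixSums line).getD t 0 - (prefixSums line).getD i 0 = ((cur.drop i).take (t - i)).sum := by
  rw [prefixSums_getD line t ht, prefixSums_getD line i (by omega),
    sum_take_sub line i t hit ht, window_eq line cur hlen i hag i t le_rfl hit ht]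

-- popScanB's outcome characterises B's generator search over the remaining range
theorem find_char (line cur : List Int) (hlen : cur.length = line.length)
    (i : Nat) (hag : ∀ t, i ≤ t → t < line.length → cur.getD t 0 = line.getD t 0) (k : Nat) :
    ∀ j s, i ≤ j → j ≤ line.length → line.length - j = k →
      s = ((cur.drop i).take (j - i)).sum → s < 10 →
      ((10 ≤ (popScanB k cur j s).2 →
          (List.range' (j + 1) (line.length - j)).find?
              (fun t => decide ((10 : Int) ≤ (prefixSums line).getD t 0 - (prefixSums line).getD i 0)) =
            some (popScanB k cur j s).1 ∧
          (prefixSums line).getD (popScanB k cur j s).1 0 - (prefixSums line).getD i 0 =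
            (popScanB k cur j s).2) ∧
        ((popScanB k cur j s).2 < 10 →
          (List.range' (j + 1) (line.length - j)).find?
              (fun t => decide ((10 : Int) ≤ (prefixSums line).getD t 0 - (prefixSums line).getD i 0)) =
            none)) := by
  induction k with
  | zero =>
    intro j s hij hj hk hs hlt
    have hscan : popScanB 0 cur j s = (j, s) := rfl
    rw [hscan, hk]
    exact ⟨fun h => absurd h (by omega), fun _ => rfl⟩
  | succ k ih =>
    intro j s hij hj hk hs hlt
    have hjlt : j < line.length := by omega
    have hjc : j < cur.length := by omega
    have hgd : (cur.drop i).getD (j - i) 0 = cur.getD j 0 := by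
      rw [List.getD_eq_getElem _ 0 (by simp; omega), List.getD_eq_getElem _ 0 hjc]
      rw [List.getElem_drop]
      congr 1
      omega
    have hsum : s + cur.getD j 0 = ((cur.drop i).take (j + 1 - i)).sum := by
      rw [hs, (by omega : j + 1 - i = (j - i) + 1), sum_take_succ_getD _ _ (by simp; omega), hgd]
    have hpd : (prefixSums line).getD (j + 1) 0 - (prefixSums line).getD i 0 = s + cur.getD j 0 := by
      rw [pref_diff line cur hlen i hag (j + 1) (by omega) (by omega), hsum]
    have hrange : List.range' (j + 1) (line.length - j) = (j + 1) :: List.range' (j + 2) (line.length - (j + 1)) := by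
      rw [(by omega : line.length - j = (line.length - (j + 1)) + 1)]
      rw [List.range'_succ]
    have hscan : popScanB (k + 1) cur j s =
        (if s + cur.getD j 0 ≥ 10 then (j + 1, s + cur.getD j 0)
         else popScanB k cur (j + 1) (s + cur.getD j 0)) := by
      rw [popScanB, if_pos hjc]
    by_cases hge : (10 : Int) ≤ s + cur.getD j 0
    · rw [hscan, if_pos hge, hrange]
      dsimp only
      rw [List.find?_cons_of_pos (by simp only [decide_eq_true_eq]; rw [hpd]; exact hge)]
      exact ⟨fun _ => ⟨rfl, hpd⟩, fun h => absurd hge (not_le.mpr h)⟩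
    · rw [hscan, if_neg hge, hrange]
      rw [List.find?_cons_of_neg (by simp only [decide_eq_true_eq]; rw [hpd]; omega)]
      exact ih (j + 1) (s + cur.getD j 0) (by omega) (by omega) (by omega) hsum (by omega)

-- proof-side splice form of one zeroing run
def applyRun (out : List Int) (r : Nat × Nat) : List Int :=
  out.take r.1 ++ List.replicate (r.2 - r.1) 0 ++ out.drop r.2

-- index-wise zeroing of [i, i+d) equals the splice form
theorem setFold_eq (d : Nat) : ∀ (i : Nat) (cur : List Int), i + d ≤ cur.length →
    (List.range' i d).foldl (fun o t => o.set t 0) cur =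
      cur.take i ++ List.replicate d 0 ++ cur.drop (i + d) := by
  induction d with
  | zero =>
    intro i cur h
    simp
  | succ d ih =>
    intro i cur h
    rw [List.range'_succ, List.foldl_cons, ih (i + 1) (cur.set i 0) (by simp; omega)]
    have hset : cur.set i 0 = cur.take i ++ 0 :: cur.drop (i + 1) := by
      rw [List.set_eq_take_append_cons_drop, if_pos (by omega)]
    rw [hset]
    have hAl : (cur.take i).length = i := by simp; omega
    have h1 : (cur.take i ++ 0 :: cur.drop (i + 1)).take (i + 1) = cur.take i ++ [0] := by
      rw [List.take_append, hAl, show i + 1 - i = 1 by omega,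
        List.take_of_length_le (by rw [hAl]; omega)]
      rfl
    have h2 : (cur.take i ++ 0 :: cur.drop (i + 1)).drop (i + 1 + d) = cur.drop (i + 1 + d) := by
      rw [List.drop_append, hAl, show i + 1 + d - i = d + 1 by omega,
        List.drop_eq_nil_of_le (by rw [hAl]; omega), List.drop_succ_cons, List.drop_drop,
        List.nil_append]
    rw [h1, h2, List.append_assoc (cur.take i) [0]]
    simp only [List.singleton_append, ← List.replicate_succ]
    rw [(by omega : i + 1 + d = i + (d + 1))]

theorem setRun_eq_applyRun (cur : List Int) (r : Nat × Nat) (h1 : r.1 ≤ r.2)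
    (h2 : r.2 ≤ cur.length) : setRun cur r = applyRun cur r := by
  unfold setRun applyRun
  rw [setFold_eq (r.2 - r.1) r.1 cur (by omega)]
  rw [(by omega : r.1 + (r.2 - r.1) = r.2)]

-- getD of a zeroed-out list right of the zeroed run
theorem applyRun_getD (cur : List Int) (a b t : Nat) (hab : a ≤ b) (hb : b ≤ cur.length)
    (ht : b ≤ t) :
    (cur.take a ++ List.replicate (b - a) 0 ++ cur.drop b).getD t 0 = cur.getD t 0 := by
  rw [List.getD_eq_getElem?_getD, List.getD_eq_getElem?_getD, List.append_assoc,
    List.getElem?_append_right (by simp; omega),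
    List.getElem?_append_right (by simp; omega)]
  simp only [List.length_take, List.length_replicate, List.getElem?_drop]
  congr 2
  omega

theorem applyRun_length (cur : List Int) (a b : Nat) (hab : a ≤ b) (hb : b ≤ cur.length) :
    (cur.take a ++ List.replicate (b - a) 0 ++ cur.drop b).length = cur.length := by
  simp
  omega

-- bounds on the collected runs
theorem zeroRuns_bounds (pref : List Int) (n : Nat) : ∀ (k i : Nat),
    ∀ r ∈ zeroRunsLoop k pref n i, i ≤ r.1 ∧ r.1 ≤ r.2 ∧ r.2 ≤ n := by
  intro k
  induction k with
  | zero => intro i r hr; simp [zeroRunsLoop] at hr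
  | succ k ih =>
    intro i r hr
    rw [zeroRunsLoop] at hr
    by_cases hi : i < n
    · rw [if_pos hi] at hr
      cases hfind : findJ pref i n with
      | none => rw [hfind] at hr; simp at hr
      | some j =>
        rw [hfind] at hr
        dsimp only at hr
        have hjmem : j ∈ List.range' (i + 1) (n - i) :=
          List.mem_of_find?_eq_some (by unfold findJ at hfind; exact hfind)
        have hj : i + 1 ≤ j ∧ j ≤ n := by
          have := List.mem_range'_1.mp hjmem
          omega
        by_cases h10 : pref.getD j 0 - pref.getD i 0 = 10
        · rw [if_pos h10] at hr
          rcases List.mem_cons.1 hr with rfl | hr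
          · exact ⟨le_rfl, by omega⟩
          · have := ih j r hr
            omega
        · rw [if_neg h10] at hr
          have := ih (i + 1) r hr
          omega
    · rw [if_neg hi] at hr
      simp at hr

theorem foldl_applyRun_length (runs : List (Nat × Nat)) :
    ∀ cur : List Int, (∀ r ∈ runs, r.1 ≤ r.2 ∧ r.2 ≤ cur.length) →
      (runs.foldl applyRun cur).length = cur.length := by
  induction runs with
  | nil => intro cur _; rfl
  | cons r rs ih =>
    intro cur h
    rw [List.foldl_cons]
    have hr := h r (by simp)
    have hlen : (applyRun cur r).length = cur.length :=
      applyRun_length cur r.1 r.2 hr.1 hr.2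
    rw [ih (applyRun cur r) (fun q hq => by rw [hlen]; exact h q (List.mem_cons_of_mem _ hq)), hlen]

theorem foldl_setRun_eq (runs : List (Nat × Nat)) :
    ∀ cur : List Int, (∀ r ∈ runs, r.1 ≤ r.2 ∧ r.2 ≤ cur.length) →
      runs.foldl setRun cur = runs.foldl applyRun cur := by
  induction runs with
  | nil => intro cur _; rfl
  | cons r rs ih =>
    intro cur h
    have hr := h r (by simp)
    rw [List.foldl_cons, List.foldl_cons, setRun_eq_applyRun cur r hr.1 hr.2]
    have hlen : (applyRun cur r).length = cur.length := applyRun_length cur r.1 r.2 hr.1 hr.2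
    exact ih (applyRun cur r)
      (fun q hq => by
        rw [hlen]
        exact h q (List.mem_cons_of_mem _ hq))

theorem popLineAlt_eq_foldl_applyRun (line : List Int) :
    popLineAlt line =
      (zeroRunsLoop line.length (prefixSums line) line.length 0).foldl applyRun line := by
  unfold popLineAlt
  exact foldl_setRun_eq _ line
    (fun r hr => (zeroRuns_bounds (prefixSums line) line.length line.length 0 r hr).2)

theorem popLineAlt_length (line : List Int) : (popLineAlt line).length = line.length := by
  rw [popLineAlt_eq_foldl_applyRun]
  exact foldl_applyRun_length _ line
    (fun r hr => (zeroRuns_bounds (prefixSums line) line.length line.length 0 r hr).2)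

-- main simulation: A's loop from state (cur, i, i+1) computes B's remaining runs applied to cur
theorem main_sim (line : List Int) : ∀ (k : Nat) (cur : List Int) (i f : Nat),
    cur.length = line.length →
    (∀ t, i ≤ t → t < line.length → cur.getD t 0 = line.getD t 0) →
    line.length - i ≤ k →
    (line.length - i) * (line.length + 2) + 1 ≤ f →
    popLineA f cur i (i + 1) =
      (zeroRunsLoop k (prefixSums line) line.length i).foldl applyRun cur := by
  intro k
  induction k with
  | zero =>
    intro cur i f hlen hag hk hf
    obtain ⟨f', rfl⟩ : ∃ f', f = f' + 1 := ⟨f - 1, by omega⟩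
    rw [popLineA, if_neg (by omega)]
    rfl
  | succ k ih =>
    intro cur i f hlen hag hk hf
    by_cases hi : i < line.length
    · have hic : i < cur.length := by omega
      have hfge : line.length + 1 - i ≤ f := by
        have : line.length - i ≤ (line.length - i) * (line.length + 2) :=
          Nat.le_mul_of_pos_right _ (by omega)
        omega
      have hscan := scan_sim_aux cur i hic (cur.length - i) i 0 f le_rfl (le_of_lt hic) rfl
        (by omega) (by simp) (by norm_num)
      rw [hlen] at hscan
      have hfc := find_char line cur hlen i hag (line.length - i) i 0 le_rfl (le_of_lt hi) rfl
        (by simp) (by norm_num)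
      have hbnd := popScanB_bounds cur (line.length - i) i 0
      have hgt := popScanB_gt cur (line.length - i) i 0 (by omega) hic
      rcases hP : popScanB (line.length - i) cur i 0 with ⟨j', s'⟩
      rw [hP] at hscan hfc hbnd hgt
      dsimp only at hscan hfc hbnd hgt
      have hmax : max i cur.length = cur.length := Nat.max_eq_right (le_of_lt hic)
      rw [hmax] at hbnd
      have hj'le : j' ≤ line.length := by omega
      -- fuel accounting facts
      have hmul : (line.length - i) * (line.length + 2) =
          (line.length - j') * (line.length + 2) + (j' - i) * (line.length + 2) := by
        rw [← Nat.add_mul]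
        congr 1
        omega
      have hle : j' - i ≤ (j' - i) * (line.length + 2) :=
        Nat.le_mul_of_pos_right _ (by omega)
      have hmul2 : (line.length - i) * (line.length + 2) =
          (line.length - (i + 1)) * (line.length + 2) + (line.length + 2) := by
        conv_lhs => rw [(by omega : line.length - i = (line.length - (i + 1)) + 1)]
        rw [Nat.add_mul, Nat.one_mul]
      by_cases h10 : s' = (10 : Int)
      · obtain ⟨hfind, hpd⟩ := hfc.1 (by omega)
        have hfindJ : findJ (prefixSums line) i line.length = some j' := hfind
        have hz : zeroRunsLoop (k + 1) (prefixSums line) line.length i =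
            (i, j') :: zeroRunsLoop k (prefixSums line) line.length j' := by
          rw [zeroRunsLoop, if_pos hi, hfindJ]
          dsimp only
          rw [if_pos (by rw [hpd, h10])]
        rw [hz, List.foldl_cons]
        have happ : applyRun cur (i, j') =
            cur.take i ++ List.replicate (j' - i) 0 ++ cur.drop j' := rfl
        rw [happ]
        rw [hscan, if_pos h10]
        apply ih
        · rw [applyRun_length cur i j' (by omega) (by omega)] <;> omega
        · intro t hjt htl
          rw [applyRun_getD cur i j' t (by omega) (by omega) hjt]
          exact hag t (by omega) htl
        · omega
        · omega
      · by_cases hgt10 : s' > (10 : Int)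
        · obtain ⟨hfind, hpd⟩ := hfc.1 (by omega)
          have hfindJ : findJ (prefixSums line) i line.length = some j' := hfind
          have hz : zeroRunsLoop (k + 1) (prefixSums line) line.length i =
              zeroRunsLoop k (prefixSums line) line.length (i + 1) := by
            rw [zeroRunsLoop, if_pos hi, hfindJ]
            dsimp only
            rw [if_neg (by rw [hpd]; omega)]
          rw [hz]
          rw [hscan, if_neg h10, if_pos hgt10]
          apply ih
          · exact hlen
          · intro t hjt htl
            exact hag t (by omega) htl
          · omega
          · omega
        · have hfind := hfc.2 (by omega)
          have hfindJ : findJ (prefixSums line) i line.length = none := hfind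
          have hz : zeroRunsLoop (k + 1) (prefixSums line) line.length i = [] := by
            rw [zeroRunsLoop, if_pos hi, hfindJ]
          rw [hz]
          rw [hscan, if_neg h10, if_neg hgt10]
          rfl
    · obtain ⟨f', rfl⟩ : ∃ f', f = f' + 1 := ⟨f - 1, by omega⟩
      rw [popLineA, if_neg (by omega)]
      rw [zeroRunsLoop, if_neg hi]
      rfl

theorem popLine_eq_popLineAlt : popLine = popLineAlt := by
  funext line
  unfold popLine
  rw [popLineAlt_eq_foldl_applyRun]
  apply main_sim line line.length line 0 ((line.length + 1) * (line.length + 2)) rfl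
    (fun _ _ _ => rfl) (by omega)
  have h1 : line.length - 0 = line.length := by omega
  rw [h1]
  nlinarith

theorem range_map_pyGetD_take (row : List Int) (w : Nat) (hw : w ≤ row.length) :
    (List.range w).map (fun j => PySem.List.pyGetD row ((j : Nat) : Int) 0) = row.take w := by
  apply List.ext_getElem
  · simp [hw]
  · intro j h1 h2
    simp only [List.getElem_map, List.getElem_range, List.getElem_take]
    rw [PySem.List.pyGetD_natCast, List.getD_eq_getElem row 0 (by simp at h1; omega)]

theorem range_map_pyGetD_col (matrix : List (List Int)) (j : Nat) :
    (List.range matrix.length).map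
        (fun i => PySem.List.pyGetD (PySem.List.pyGetD matrix ((i : Nat) : Int) []) ((j : Nat) : Int) 0) =
      matrix.map (fun row => row.getD j 0) := by
  apply List.ext_getElem
  · simp
  · intro i h1 h2
    simp only [List.getElem_map, List.getElem_range]
    have hi : i < matrix.length := by simpa using h1
    rw [PySem.List.pyGetD_natCast, PySem.List.pyGetD_natCast, List.getD_eq_getElem matrix [] hi]

theorem range_map_pyGetD_row (cols : List (List Int)) (i : Nat) :
    (List.range cols.length).map
        (fun j => PySem.List.pyGetD (PySem.List.pyGetD cols ((j : Nat) : Int) []) ((i : Nat) : Int) 0) =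
      cols.map (fun col => col.getD i 0) := by
  apply List.ext_getElem
  · simp
  · intro j h1 h2
    simp only [List.getElem_map, List.getElem_range]
    have hj : j < cols.length := by simpa using h1
    rw [PySem.List.pyGetD_natCast, PySem.List.pyGetD_natCast, List.getD_eq_getElem cols [] hj]

-- ===== VERDICT (by name: the statement is the Claim_ definition above) =====
theorem pop_apple_spec : Claim_equal_pop_apple := by
  intro matrix dir_row _ hpre
  obtain ⟨hne, hrows, hw0⟩ := hpre
  unfold Spec_pop_apple
  have hhead : PySem.List.pyGetD matrix 0 [] = matrix.headD [] := by
    obtain ⟨r, rest, rfl⟩ := List.exists_cons_of_ne_nil hne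
    rw [PySem.List.pyGetD_zero]
    rfl
  cases dir_row with
  | true =>
    unfold pop_apple pop_apple_alt
    rw [if_pos rfl, if_pos rfl, popLine_eq_popLineAlt, hhead]
    apply List.ext_getElem
    · simp
    · intro i h1 h2
      simp only [List.getElem_map, List.getElem_range]
      have hi : i < matrix.length := by simpa using h1
      congr 1
      have hge : PySem.List.pyGetD matrix ((i : Nat) : Int) [] = matrix[i] := by
        rw [PySem.List.pyGetD_natCast, List.getD_eq_getElem matrix [] hi]
      rw [hge]
      exact range_map_pyGetD_take _ _ (hrows _ (List.getElem_mem hi))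
  | false =>
    unfold pop_apple pop_apple_alt
    rw [if_neg (by simp), if_neg (by simp), popLine_eq_popLineAlt, hhead]
    have hw : (matrix.headD []).length ≠ 0 := hw0 rfl
    have hcols :
        (List.range (matrix.headD []).length).map (fun j =>
            popLineAlt ((List.range matrix.length).map
              (fun i => PySem.List.pyGetD (PySem.List.pyGetD matrix ((i : Nat) : Int) []) ((j : Nat) : Int) 0))) =
          (List.range (matrix.headD []).length).map (fun j =>
            popLineAlt (matrix.map (fun row => row.getD j 0))) := by
      apply List.map_congr_left
      intro j _
      rw [range_map_pyGetD_col]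
    rw [hcols]
    unfold transposeA
    set cols := (List.range (matrix.headD []).length).map (fun j =>
      popLineAlt (matrix.map (fun row => row.getD j 0))) with hcols_def
    have hclen : cols.length = (matrix.headD []).length := by simp [hcols_def]
    have hc0 : PySem.List.pyGetD cols 0 [] = cols.getD 0 [] := PySem.List.pyGetD_zero cols []
    have hc0len : (PySem.List.pyGetD cols 0 []).length = matrix.length := by
      rw [hc0, List.getD_eq_getElem cols [] (by omega)]
      simp only [hcols_def, List.getElem_map, List.getElem_range]
      rw [popLineAlt_length]
      simp
    rw [hc0len]
    apply List.ext_getElem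
    · simp
    · intro i h1 h2
      simp only [List.getElem_map, List.getElem_range]
      exact range_map_pyGetD_row cols i
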